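-- pv_equiv track=rewrite | github.com/ritikdrona/programs | python/countChocolates.py | count_chocolates
-- ===== SOURCE A (Python) =====
-- def count_chocolates(chocolate_list: str):
--     chocolates = list(map(int, chocolate_list.split(',')))
--
--     total_chocolates = 0
--     max_box, max_chocolates = None, 0
--     for i, c in enumerate(chocolates):
--         if c%2 == 0:
--             total_chocolates += 2*c
--             if max_chocolates < c:
--                 max_chocolates = c
--                 max_box = i + 1
--
--     return [total_chocolates, max_box]
-- ===== SOURCE B (Python) =====
-- def count_chocolates(chocolate_list: str):
--     chocolates = [int(t) for t in chocolate_list.split(',')]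
--     total = sum(2 * c for c in chocolates if c % 2 == 0)
--     positives = [(i + 1, c) for i, c in enumerate(chocolates) if c % 2 == 0 and c > 0]
--     max_box = max(positives, key=lambda p: p[1])[0] if positives else None
--     return [total, max_box]
-- ===== Notes on version B (the rewrite author's own statement) =====
-- stated objective: alternative
-- what changed: Replaces A's single stateful loop (running total plus running strict-max with box index) by a declarative two-pass decomposition: a sum over the even counts and an independent first-argmax over the positive even boxes.
import Mathlib
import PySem

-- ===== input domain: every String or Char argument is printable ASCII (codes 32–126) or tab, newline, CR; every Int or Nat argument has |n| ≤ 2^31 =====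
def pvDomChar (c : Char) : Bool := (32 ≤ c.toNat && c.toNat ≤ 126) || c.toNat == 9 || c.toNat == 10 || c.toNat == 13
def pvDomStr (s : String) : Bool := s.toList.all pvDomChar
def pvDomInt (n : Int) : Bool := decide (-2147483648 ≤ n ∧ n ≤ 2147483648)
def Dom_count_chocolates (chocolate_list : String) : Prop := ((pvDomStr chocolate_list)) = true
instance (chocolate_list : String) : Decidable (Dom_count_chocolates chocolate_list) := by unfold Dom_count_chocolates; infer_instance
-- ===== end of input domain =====

-- B keeps A's return value but replaces the single stateful loop by a sum over evens plus an
-- independent first-argmax over the positive even boxes (objective: alternative decomposition).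

-- shared parse step: list(map(int, chocolate_list.split(','))) — identical line in both Pythons;
-- under Pre_ every token parses, so filterMap equals the Python map(int, …)
def pvParse (chocolate_list : String) : List Int :=
  ((PySem.Str.split? chocolate_list ",").getD []).filterMap PySem.Int.ofStr?

-- ===== PORT A =====
def count_chocolates (chocolate_list : String) : List (Option Int) :=
  let chocolates := pvParse chocolate_list
  let st := (PySem.List.enumerate chocolates).foldl
    (fun (s : Int × Option Int × Int) (p : Int × Int) =>
      if p.2 % 2 == 0 then
        let total := s.1 + 2 * p.2
        if s.2.2 < p.2 then (total, some (p.1 + 1), p.2) else (total, s.2.1, s.2.2)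
      else s)
    (0, none, 0)
  [some st.1, st.2.1]

-- ===== PORT B =====
def count_chocolates_alt (chocolate_list : String) : List (Option Int) :=
  let chocolates := pvParse chocolate_list
  let total := ((chocolates.filter (fun c => c % 2 == 0)).map (fun c => 2 * c)).foldl (· + ·) 0
  let positives := ((PySem.List.enumerate chocolates).filter
      (fun p => p.2 % 2 == 0 && 0 < p.2)).map (fun p => (p.1 + 1, p.2))
  let max_box := (PySem.List.max? positives (fun p => p.2)).map (fun p => p.1)
  [some total, max_box]

-- ===== PRECONDITION & SPEC =====
-- Pre_: every comma-separated token is a valid Python int literal (otherwise A raises ValueError)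
def Pre_count_chocolates (chocolate_list : String) : Prop :=
  ((PySem.Str.split? chocolate_list ",").getD []).all (fun t => (PySem.Int.ofStr? t).isSome) = true
instance (chocolate_list : String) : Decidable (Pre_count_chocolates chocolate_list) := by
  unfold Pre_count_chocolates; infer_instance
def pvWitness_count_chocolates : String := "3,4,-2, 6 ,5"
def Spec_count_chocolates (chocolate_list : String) (out : List (Option Int)) : Prop := out = count_chocolates_alt chocolate_list
instance (chocolate_list : String) (out : List (Option Int)) : Decidable (Spec_count_chocolates chocolate_list out) := by unfold Spec_count_chocolates; infer_instance

-- ===== CLAIM (what is proved, stated in full; the proofs are below) =====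
def Claim_equal_count_chocolates : Prop := ∀ (chocolate_list : String), Dom_count_chocolates chocolate_list → Pre_count_chocolates chocolate_list → Spec_count_chocolates chocolate_list (count_chocolates chocolate_list)

-- ===== LEMMAS AND PROOFS =====

-- the body of PySem.List.max? for key (·.2) on Int pairs
def pvStep (acc : Option (Int × Int)) (p : Int × Int) : Option (Int × Int) :=
  match acc with
  | none => some p
  | some m => if m.2 < p.2 then some p else some m

lemma max?_eq_foldl_pvStep (Q : List (Int × Int)) :
    PySem.List.max? Q (fun p => p.2) = Q.foldl pvStep none := by
  unfold PySem.List.max?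
  apply PySem.List.foldl_congr_mem
  intro acc x _
  cases acc <;> rfl

lemma foldl_pvStep_some (Q : List (Int × Int)) (m : Int × Int) :
    Q.foldl pvStep (some m) =
      match Q.foldl pvStep none with
      | none => some m
      | some p => if m.2 < p.2 then some p else some m := by
  induction Q generalizing m with
  | nil => simp
  | cons x Q ih =>
    simp only [List.foldl_cons, pvStep]
    split_ifs with h
    · rw [ih x]
      rcases hq : Q.foldl pvStep none with _ | p
      · simp [h]
      · simp only []
        split_ifs with h2 <;> simp_all <;> omega
    · rw [ih m, ih x]
      rcases hq : Q.foldl pvStep none with _ | p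
      · simp [h]
      · simp only []
        split_ifs with h2 <;> simp_all <;> omega

lemma max?_filter_gt (Q : List (Int × Int)) (thr : Int) :
    (Q.filter (fun p => decide (thr < p.2))).foldl pvStep none =
      match Q.foldl pvStep none with
      | none => none
      | some p => if thr < p.2 then some p else none := by
  induction Q with
  | nil => simp
  | cons x Q ih =>
    have hcons : (x :: Q).foldl pvStep none = Q.foldl pvStep (some x) := rfl
    rw [hcons, foldl_pvStep_some]
    by_cases hx : thr < x.2
    · rw [List.filter_cons_of_pos (by simpa using hx)]
      have hcons2 : (x :: (Q.filter (fun p => decide (thr < p.2)))).foldl pvStep none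
          = (Q.filter (fun p => decide (thr < p.2))).foldl pvStep (some x) := rfl
      rw [hcons2, foldl_pvStep_some, ih]
      rcases hq : Q.foldl pvStep none with _ | p
      · simp [hx]
      · simp only []
        split_ifs <;> simp_all <;> omega
    · rw [List.filter_cons_of_neg (by simpa using hx), ih]
      rcases hq : Q.foldl pvStep none with _ | p
      · simp [hx]
      · simp only []
        split_ifs <;> simp_all <;> omega

lemma foldl_pvStep_map (Q : List (Int × Int)) :
    (Q.map (fun p => (p.1 + 1, p.2))).foldl pvStep none
      = (Q.foldl pvStep none).map (fun p => (p.1 + 1, p.2)) := by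
  have key : ∀ (acc : Option (Int × Int)),
      (Q.map (fun p => (p.1 + 1, p.2))).foldl pvStep (acc.map (fun p => (p.1 + 1, p.2)))
        = (Q.foldl pvStep acc).map (fun p => (p.1 + 1, p.2)) := by
    induction Q with
    | nil => intro acc; simp
    | cons x Q ih =>
      intro acc
      simp only [List.map_cons, List.foldl_cons]
      have h1 : pvStep (acc.map (fun p => (p.1 + 1, p.2))) (x.1 + 1, x.2)
          = (pvStep acc x).map (fun p => (p.1 + 1, p.2)) := by
        cases acc <;> simp only [pvStep, Option.map_none, Option.map_some] <;> split_ifs <;> rfl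
      rw [h1, ih]
  simpa using key none

lemma foldl_add_shift (l : List Int) (a : Int) :
    l.foldl (· + ·) a = a + l.foldl (· + ·) 0 := by
  induction l generalizing a with
  | nil => simp
  | cons x l ih =>
    simp only [List.foldl_cons]
    rw [ih (a + x), ih (0 + x)]; ring

-- A's loop, characterised: the total becomes t plus B's even-sum, and (max_box, max_chocolates)
-- become the first argmax of the enumerated evens strictly above the running threshold mc
lemma foldA_spec (cs : List Int) (s t : Int) (mb : Option Int) (mc : Int) :
    (PySem.List.enumerate cs s).foldl
        (fun (st : Int × Option Int × Int) (p : Int × Int) =>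
          if p.2 % 2 == 0 then
            let total := st.1 + 2 * p.2
            if st.2.2 < p.2 then (total, some (p.1 + 1), p.2) else (total, st.2.1, st.2.2)
          else st)
        (t, mb, mc)
      = (t + ((cs.filter (fun c => c % 2 == 0)).map (fun c => 2 * c)).foldl (· + ·) 0,
         match ((PySem.List.enumerate cs s).filter
             (fun p => p.2 % 2 == 0 && decide (mc < p.2))).foldl pvStep none with
         | none => (mb, mc)
         | some p => (some (p.1 + 1), p.2)) := by
  induction cs generalizing s t mb mc with
  | nil => simp [PySem.List.enumerate_nil]
  | cons c cs ih =>
    rw [PySem.List.enumerate_cons, List.foldl_cons]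
    dsimp only
    by_cases he : c % 2 = 0
    · have heb : ((c : Int) % 2 == 0) = true := by simpa using he
      have hfc : (((c :: cs).filter (fun c => c % 2 == 0)).map (fun c => 2 * c)).foldl (· + ·) 0
          = 2 * c + ((cs.filter (fun c => c % 2 == 0)).map (fun c => 2 * c)).foldl (· + ·) 0 := by
        rw [List.filter_cons_of_pos (by simpa using he), List.map_cons, List.foldl_cons,
          foldl_add_shift _ (0 + 2 * c)]
        ring
      rw [hfc]
      by_cases hm : mc < c
      · rw [if_pos heb, if_pos hm, ih]
        rw [List.filter_cons_of_pos (by simp [he, hm])]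
        have hcons : ((s, c) :: ((PySem.List.enumerate cs (s + 1)).filter
              (fun p => p.2 % 2 == 0 && decide (mc < p.2)))).foldl pvStep none
            = ((PySem.List.enumerate cs (s + 1)).filter
              (fun p => p.2 % 2 == 0 && decide (mc < p.2))).foldl pvStep (some (s, c)) := rfl
        rw [hcons, foldl_pvStep_some]
        have hfe : (PySem.List.enumerate cs (s + 1)).filter
              (fun p => p.2 % 2 == 0 && decide (c < p.2))
            = ((PySem.List.enumerate cs (s + 1)).filter
              (fun p => p.2 % 2 == 0 && decide (mc < p.2))).filter
                (fun p => decide (c < p.2)) := by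
          rw [List.filter_filter]
          apply List.filter_congr
          intro p _
          by_cases h1 : p.2 % 2 = 0 <;> by_cases h2 : c < p.2 <;>
            simp [h1, h2] <;> omega
        rw [hfe, max?_filter_gt]
        rcases hq : ((PySem.List.enumerate cs (s + 1)).filter
            (fun p => p.2 % 2 == 0 && decide (mc < p.2))).foldl pvStep none with _ | p
        · simp only [hq]
          exact Prod.ext (by ring) rfl
        · simp only [hq]
          by_cases hc : c < p.2
          · rw [if_pos hc, if_pos hc]
            exact Prod.ext (by ring) rfl
          · rw [if_neg hc, if_neg hc]
            exact Prod.ext (by ring) rfl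
      · rw [if_pos heb, if_neg hm, ih]
        rw [List.filter_cons_of_neg (by simp [hm])]
        exact Prod.ext (by ring) rfl
    · have heb : ((c : Int) % 2 == 0) = false := by simpa using he
      rw [if_neg (by simp [heb]), ih]
      rw [List.filter_cons_of_neg (by simp [heb]),
        List.filter_cons_of_neg (by simp [heb])]

-- ===== VERDICT (by name: the statement is the Claim_ definition above) =====
theorem count_chocolates_spec : Claim_equal_count_chocolates := by
  intro s _ _
  show count_chocolates s = count_chocolates_alt s
  simp only [count_chocolates, count_chocolates_alt]
  rw [foldA_spec, max?_eq_foldl_pvStep, foldl_pvStep_map]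
  rcases hq : ((PySem.List.enumerate (pvParse s) 0).filter
      (fun p => p.2 % 2 == 0 && decide ((0 : Int) < p.2))).foldl pvStep none with _ | p <;>
    simp [hq]
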